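-- pv_equiv track=rewrite | github.com/luke3296/ml-labs | 100193308/scripts/decision_trees.py | ct_from_data
-- ===== SOURCE A (Python) =====
-- def ct_from_data(data):
--
--     attribute=data[2]
--     class_attr=data[len(data)-1]
--     tp = 0
--     tn = 0
--     fn = 0
--     fp = 0
--     for i in range(len(data[0])):
--         if (attribute[i] == 1 and class_attr[i] == 1):
--                   tp+=1
--         elif (attribute[i] == 0 and class_attr[i] == 0):
--                   tn+=1
--         elif (attribute[i] == 0 and  class_attr[i] == 1):
--                   fn+=1
--         elif (attribute[i] == 1 and  class_attr[i] == 0):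
--                   fp+=1
--     return [[tn, fn],[fp, tp]]
-- ===== SOURCE B (Python) =====
-- def ct_from_data(data):
--     n = len(data[0])
--     pairs = list(zip(data[2][:n], data[len(data) - 1][:n]))
--     return [[pairs.count((0, 0)), pairs.count((0, 1))],
--             [pairs.count((1, 0)), pairs.count((1, 1))]]
-- ===== Notes on version B (the rewrite author's own statement) =====
-- stated objective: idiomatic
-- what changed: Replaces the indexed loop with a four-way branch and four scalar counters by building the list of (attribute, class) pairs once with zip and reading each confusion-matrix cell off with list.count.
import Mathlib
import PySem

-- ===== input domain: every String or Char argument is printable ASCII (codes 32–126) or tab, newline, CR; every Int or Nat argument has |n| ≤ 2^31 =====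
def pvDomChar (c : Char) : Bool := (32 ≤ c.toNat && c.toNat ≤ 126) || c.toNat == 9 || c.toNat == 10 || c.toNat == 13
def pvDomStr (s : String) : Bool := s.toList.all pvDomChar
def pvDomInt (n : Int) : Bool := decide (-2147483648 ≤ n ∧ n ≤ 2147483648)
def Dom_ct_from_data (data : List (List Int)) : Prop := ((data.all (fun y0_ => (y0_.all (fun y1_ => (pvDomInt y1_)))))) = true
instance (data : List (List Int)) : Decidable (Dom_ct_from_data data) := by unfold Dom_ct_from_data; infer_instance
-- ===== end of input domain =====

-- B replaces A's branch-and-increment loop over four scalar counters by zipping the two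
-- rows into a pair list and reading each cell off with list.count; objective: idiomatic (same cost).

-- ===== PORT A =====
-- one step of A's loop body, state (tp, tn, fn, fp)
def ctStepA (att cls : List Int) (s : Int × Int × Int × Int) (i : Int) : Int × Int × Int × Int :=
  let a := PySem.List.pyGetD att i 0
  let c := PySem.List.pyGetD cls i 0
  if a = 1 ∧ c = 1 then (s.1 + 1, s.2.1, s.2.2.1, s.2.2.2)
  else if a = 0 ∧ c = 0 then (s.1, s.2.1 + 1, s.2.2.1, s.2.2.2)
  else if a = 0 ∧ c = 1 then (s.1, s.2.1, s.2.2.1 + 1, s.2.2.2)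
  else if a = 1 ∧ c = 0 then (s.1, s.2.1, s.2.2.1, s.2.2.2 + 1)
  else s

def ct_from_data (data : List (List Int)) : List (List Int) :=
  let attr_ := PySem.List.pyGetD data 2 []
  let class_attr := PySem.List.pyGetD data ((data.length : Int) - 1) []
  let n := (PySem.List.pyGetD data 0 []).length
  let s := (PySem.List.pyRange 0 (n : Int) 1).foldl (ctStepA attr_ class_attr) (0, 0, 0, 0)
  [[s.2.1, s.2.2.1], [s.2.2.2, s.1]]

-- ===== PORT B =====
def ct_from_data_alt (data : List (List Int)) : List (List Int) :=
  let n := (PySem.List.pyGetD data 0 []).length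
  let pairs := List.zip
    (PySem.List.slice (PySem.List.pyGetD data 2 []) none (some (n : Int)))
    (PySem.List.slice (PySem.List.pyGetD data ((data.length : Int) - 1) []) none (some (n : Int)))
  [[(pairs.count (0, 0) : Int), (pairs.count (0, 1) : Int)],
   [(pairs.count (1, 0) : Int), (pairs.count (1, 1) : Int)]]

-- ===== PRECONDITION & SPEC =====
-- Pre_ is exactly A's returning domain: at least 3 rows, data[0] no longer than the
-- attribute row, and (because A's `and` short-circuits past class_attr[i] when
-- attribute[i] is not 0 or 1) every index with a binary attribute value lies inside the
-- last row; outside it A raises IndexError.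
def Pre_ct_from_data (data : List (List Int)) : Prop :=
  3 ≤ data.length ∧
  (data.getD 0 []).length ≤ (data.getD 2 []).length ∧
  ∀ i < (data.getD 0 []).length,
    ((data.getD 2 []).getD i 0 = 0 ∨ (data.getD 2 []).getD i 0 = 1) →
      i < (data.getD (data.length - 1) []).length
instance (data : List (List Int)) : Decidable (Pre_ct_from_data data) := by
  unfold Pre_ct_from_data; infer_instance

def pvWitness_ct_from_data : List (List Int) := [[1, 0], [0, 0], [1, 1], [0, 1]]

def Spec_ct_from_data (data : List (List Int)) (out : List (List Int)) : Prop := out = ct_from_data_alt data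
instance (data : List (List Int)) (out : List (List Int)) : Decidable (Spec_ct_from_data data out) := by unfold Spec_ct_from_data; infer_instance

-- ===== CLAIM (what is proved, stated in full; the proofs are below) =====
def Claim_equal_ct_from_data : Prop := ∀ (data : List (List Int)), Dom_ct_from_data data → Pre_ct_from_data data → Spec_ct_from_data data (ct_from_data data)

-- ===== LEMMAS AND PROOFS =====

-- the pair A inspects at index i
def ctKey (att cls : List Int) (i : Int) : Int × Int :=
  (PySem.List.pyGetD att i 0, PySem.List.pyGetD cls i 0)

theorem ctLoopA_eq (att cls : List Int) (l : List Int) (s : Int × Int × Int × Int) :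
    l.foldl (ctStepA att cls) s =
      (s.1 + ((l.map (ctKey att cls)).count (1, 1) : Int),
       s.2.1 + ((l.map (ctKey att cls)).count (0, 0) : Int),
       s.2.2.1 + ((l.map (ctKey att cls)).count (0, 1) : Int),
       s.2.2.2 + ((l.map (ctKey att cls)).count (1, 0) : Int)) := by
  induction l generalizing s with
  | nil => simp
  | cons i t ih =>
    obtain ⟨tp, tn, fn, fp⟩ := s
    simp only [List.foldl_cons, List.map_cons, List.count_cons, ih, ctStepA, ctKey]
    by_cases h1 : PySem.List.pyGetD att i 0 = 1 <;>
    by_cases h2 : PySem.List.pyGetD cls i 0 = 1 <;>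
    by_cases h3 : PySem.List.pyGetD att i 0 = 0 <;>
    by_cases h4 : PySem.List.pyGetD cls i 0 = 0 <;>
      simp [h1, h2, h3, h4, Prod.ext_iff, beq_iff_eq] <;> omega

-- B's pair list is the first min(n, |cls|) keys, given n ≤ |att|
theorem zip_take_eq_map_range (att cls : List Int) (n : Nat) (h : n ≤ att.length) :
    List.zip (att.take n) (cls.take n) =
      (List.range (min n cls.length)).map (fun i => (att.getD i 0, cls.getD i 0)) := by
  apply List.ext_getElem
  · simp [Nat.min_assoc]; omega
  · intro i hi _
    simp only [List.length_zip, List.length_take] at hi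
    have hia : i < att.length := by omega
    have hic : i < cls.length := by omega
    have hin : i < n := by omega
    simp [List.getElem_zip, List.getElem_take, hia, hic]

-- the keys at indices ≥ |cls| have a non-binary attribute value, so they never hit a target cell
theorem count_suffix_zero (att cls : List Int) (n : Nat) (k : Int × Int)
    (hk : k.1 = 0 ∨ k.1 = 1)
    (hbin : ∀ i < n, (att.getD i 0 = 0 ∨ att.getD i 0 = 1) → i < cls.length) :
    ((List.range' (min n cls.length) (n - min n cls.length)).map
      (fun i => (att.getD i 0, cls.getD i 0))).count k = 0 := by
  rw [List.count_eq_zero]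
  intro hmem
  simp only [List.mem_map, List.mem_range'] at hmem
  obtain ⟨i, hi, heq⟩ := hmem
  have hin : i < n := by omega
  have hic : ¬ i < cls.length := by omega
  have hfst : att.getD i 0 = k.1 := by rw [← heq]
  exact hic (hbin i hin (by rw [hfst]; exact hk))

theorem count_zip_eq (att cls : List Int) (n : Nat) (k : Int × Int)
    (hk : k.1 = 0 ∨ k.1 = 1) (h : n ≤ att.length)
    (hbin : ∀ i < n, (att.getD i 0 = 0 ∨ att.getD i 0 = 1) → i < cls.length) :
    (List.zip (att.take n) (cls.take n)).count k =
      ((List.range n).map (fun i => (att.getD i 0, cls.getD i 0))).count k := by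
  have hsplit : List.range n =
      List.range (min n cls.length) ++ List.range' (min n cls.length) (n - min n cls.length) := by
    have h1 : List.range n = List.range' 0 (min n cls.length + (n - min n cls.length)) := by
      rw [List.range_eq_range']; congr 1; omega
    rw [h1, ← List.range'_append]
    simp [List.range_eq_range']
  rw [zip_take_eq_map_range att cls n h, hsplit, List.map_append, List.count_append,
    count_suffix_zero att cls n k hk hbin]
  simp

-- ===== VERDICT (by name: the statement is the Claim_ definition above) =====
theorem ct_from_data_spec : Claim_equal_ct_from_data := by
  intro data _ hpre
  obtain ⟨h3, hatt, hbin⟩ := hpre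
  unfold Spec_ct_from_data ct_from_data ct_from_data_alt
  have e2 : PySem.List.pyGetD data 2 [] = data.getD 2 [] := by
    simpa using PySem.List.pyGetD_natCast data 2 []
  have elast : PySem.List.pyGetD data ((data.length : Int) - 1) [] = data.getD (data.length - 1) [] := by
    have h : (data.length : Int) - 1 = ((data.length - 1 : Nat) : Int) := by omega
    rw [h, PySem.List.pyGetD_natCast]
  have e0 : PySem.List.pyGetD data 0 [] = data.getD 0 [] := by
    simpa using PySem.List.pyGetD_natCast data 0 []
  simp only [e0, e2, elast]
  set att := data.getD 2 [] with hattdef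
  set cls := data.getD (data.length - 1) [] with hclsdef
  set n := (data.getD 0 []).length with hndef
  have hmap : (PySem.List.pyRange 0 (n : Int) 1).map (ctKey att cls) =
      (List.range n).map (fun i => (att.getD i 0, cls.getD i 0)) := by
    rw [PySem.List.pyRange_one, List.map_map]
    have : ((n : Int) - 0).toNat = n := by omega
    rw [this]
    apply List.map_congr_left
    intro k _
    simp [ctKey, PySem.List.pyGetD_natCast]
  have hslice : ∀ xs : List Int, PySem.List.slice xs none (some (n : Int)) = xs.take n :=
    fun xs => PySem.List.slice_to_natCast xs n
  rw [ctLoopA_eq, hmap, hslice att, hslice cls]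
  have hc := fun (k : Int × Int) (hk : k.1 = 0 ∨ k.1 = 1) =>
    count_zip_eq att cls n k hk hatt hbin
  simp only [hc (0,0) (Or.inl rfl), hc (0,1) (Or.inl rfl), hc (1,0) (Or.inr rfl),
    hc (1,1) (Or.inr rfl), zero_add]
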